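-- pv_equiv track=rewrite | github.com/GloodBuster/cryptanalysis-romel | utils.py | complete_dictionary
-- ===== SOURCE A (Python) =====
-- import string
--
-- def complete_dictionary(dictionary):
--     alphabet = string.ascii_letters + "ñ" + "Ñ"
--     used_values = set(dictionary.values())
--
--     for char in alphabet:
--         if char not in dictionary:
--             for potential_value in alphabet:
--                 if potential_value not in used_values:
--                     dictionary[char] = potential_value
--                     used_values.add(potential_value)
--                     break
--     return dictionary
-- ===== SOURCE B (Python) =====
-- import string
--
-- def complete_dictionary(dictionary):
--     alphabet = string.ascii_letters + "ñ" + "Ñ"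
--     used = set(dictionary.values())
--     missing = [c for c in alphabet if c not in dictionary]
--     available = [c for c in alphabet if c not in used]
--     dictionary.update(zip(missing, available))
--     return dictionary
-- ===== Notes on version B (the rewrite author's own statement) =====
-- stated objective: simpler
-- what changed: B has no stateful per-letter loop at all: it precomputes the list of missing keys and the list of unused values, zips them (zip truncates when values run out, matching A's non-assigning inner loop), and appends the pairs with one dict.update, replacing A's inner rescan of the whole alphabet with a growing used-values set for every missing key.
import Mathlib
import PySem

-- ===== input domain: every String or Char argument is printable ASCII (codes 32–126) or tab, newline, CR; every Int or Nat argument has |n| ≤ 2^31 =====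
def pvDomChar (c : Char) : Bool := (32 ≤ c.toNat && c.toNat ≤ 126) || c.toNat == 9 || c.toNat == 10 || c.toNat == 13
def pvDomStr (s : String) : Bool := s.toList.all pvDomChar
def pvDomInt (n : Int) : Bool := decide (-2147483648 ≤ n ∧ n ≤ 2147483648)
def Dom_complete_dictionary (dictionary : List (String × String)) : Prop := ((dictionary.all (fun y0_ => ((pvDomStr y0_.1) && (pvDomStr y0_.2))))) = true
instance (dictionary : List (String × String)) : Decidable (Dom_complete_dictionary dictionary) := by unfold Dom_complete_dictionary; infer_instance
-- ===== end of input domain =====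

-- B replaces A's stateful per-letter loop (with an inner alphabet rescan per missing key) by
-- zipping the precomputed missing-keys and unused-values lists and one bulk update (objective:
-- simpler). Both A and B mutate the argument dict in place in Python; the equivalence proved
-- here is about the returned dictionary's items.

-- ===== PORT A =====
-- string.ascii_letters + "ñ" + "Ñ", as the list of its one-character strings
def pvAlphabet : List String :=
  "abcdefghijklmnopqrstuvwxyzABCDEFGHIJKLMNOPQRSTUVWXYZñÑ".toList.map (fun c => String.ofList [c])

-- A's inner 'for potential_value in alphabet: … break' loop
def pvFindUnused (used : PySem.Set String) : List String → Option String
  | [] => none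
  | v :: rest => if PySem.Set.contains used v then pvFindUnused used rest else some v

def complete_dictionary (dictionary : List (String × String)) : List (String × String) :=
  let d0 : PySem.Dict String String := PySem.Dict.ofList dictionary
  let used0 : PySem.Set String := PySem.Set.ofList d0.values
  let final := pvAlphabet.foldl
    (fun (st : PySem.Dict String String × PySem.Set String) ch =>
      if st.1.contains ch then st
      else
        match pvFindUnused st.2 pvAlphabet with
        | none => st
        | some v => (st.1.insert ch v, PySem.Set.add st.2 v))
    (d0, used0)
  final.1.items

-- ===== PORT B =====
def complete_dictionary_alt (dictionary : List (String × String)) : List (String × String) :=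
  let d0 : PySem.Dict String String := PySem.Dict.ofList dictionary
  let used : PySem.Set String := PySem.Set.ofList d0.values
  let missing := pvAlphabet.filter (fun c => !(d0.contains c))
  let available := pvAlphabet.filter (fun c => !(PySem.Set.contains used c))
  -- dictionary.update(zip(missing, available))
  ((missing.zip available).foldl (fun d kv => d.insert kv.1 kv.2) d0).items

-- ===== PRECONDITION & SPEC =====
def Spec_complete_dictionary (dictionary : List (String × String)) (out : List (String × String)) : Prop := out = complete_dictionary_alt dictionary
instance (dictionary : List (String × String)) (out : List (String × String)) : Decidable (Spec_complete_dictionary dictionary out) := by unfold Spec_complete_dictionary; infer_instance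

-- ===== CLAIM (what is proved, stated in full; the proofs are below) =====
def Claim_equal_complete_dictionary : Prop := ∀ (dictionary : List (String × String)), Dom_complete_dictionary dictionary → Spec_complete_dictionary dictionary (complete_dictionary dictionary)

-- ===== LEMMAS AND PROOFS =====

-- A's inner scan returns the first alphabet value not in 'used': the head of the filtered list.
lemma pvFindUnused_eq_head_filter (used : PySem.Set String) (l : List String) :
    pvFindUnused used l = (l.filter (fun c => !(PySem.Set.contains used c))).head? := by
  rw [List.head?_filter]
  induction l with
  | nil => rfl
  | cons v rest ih =>
    cases h : PySem.Set.contains used v with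
    | true =>
      rw [pvFindUnused, if_pos h, ih, List.find?_cons_of_neg]
      simp_all
    | false =>
      rw [pvFindUnused, if_neg (by simp_all), List.find?_cons_of_pos]
      simp_all

lemma contains_add_set (s : PySem.Set String) (v x : String) :
    PySem.Set.contains (PySem.Set.add s v) x = (PySem.Set.contains s x || x == v) := by
  simp [pysem, PySem.Set.mem_add]
  by_cases h : x = v <;> simp [h]

lemma pvAlphabet_nodup : pvAlphabet.Nodup := by decide

-- filtering out the augmented set = filtering out the old set, then dropping v
lemma filter_add_set (s : PySem.Set String) (v : String) (l : List String) :
    l.filter (fun c => !(PySem.Set.contains (PySem.Set.add s v) c))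
      = (l.filter (fun c => !(PySem.Set.contains s c))).filter (fun c => !(c == v)) := by
  rw [List.filter_filter]
  apply List.filter_congr
  intro x _
  rw [contains_add_set]
  cases PySem.Set.contains s x <;> cases h : x == v <;> simp_all

-- Step 1: A's fold (dict, used-set) equals an intermediate fold (dict, remaining-values list),
-- with the invariant that the remaining list is the alphabet filtered by the current used-set.
lemma loop_eq (l : List String) (d : PySem.Dict String String) (used : PySem.Set String)
    (rem : List String) (hrem : rem = pvAlphabet.filter (fun c => !(PySem.Set.contains used c))) :
    (l.foldl
      (fun (st : PySem.Dict String String × PySem.Set String) ch =>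
        if st.1.contains ch then st
        else
          match pvFindUnused st.2 pvAlphabet with
          | none => st
          | some v => (st.1.insert ch v, PySem.Set.add st.2 v))
      (d, used)).1
    = (l.foldl
      (fun (st : PySem.Dict String String × List String) ch =>
        if st.1.contains ch then st
        else
          match st.2 with
          | [] => st
          | v :: rest => (st.1.insert ch v, rest))
      (d, rem)).1 := by
  induction l generalizing d used rem with
  | nil => rfl
  | cons ch l ih =>
    simp only [List.foldl_cons]
    by_cases hc : d.contains ch = true
    · rw [if_pos hc, if_pos hc]
      exact ih d used rem hrem
    · rw [if_neg hc, if_neg hc]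
      rw [pvFindUnused_eq_head_filter, ← hrem]
      cases hrc : rem with
      | nil =>
        simp only [List.head?_nil]
        exact ih d used [] (by rw [← hrc]; exact hrem)
      | cons v rest =>
        simp only [List.head?_cons]
        apply ih
        rw [filter_add_set, ← hrem, hrc]
        have hnd : rem.Nodup := hrem ▸ pvAlphabet_nodup.filter _
        have hvnotin : v ∉ rest := by
          rw [hrc] at hnd; exact (List.nodup_cons.mp hnd).1
        simp only [List.filter_cons, beq_self_eq_true, Bool.not_true, Bool.false_eq_true,
          if_false]
        exact (List.filter_eq_self.mpr (fun x hx => by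
          simp only [Bool.not_eq_eq_eq_not, Bool.not_true, beq_eq_false_iff_ne]
          exact fun hxe => hvnotin (hxe ▸ hx))).symm

-- Step 2: the intermediate fold equals B's fold of plain inserts over the zipped pairs,
-- provided the scanned letters are distinct.
lemma loop_eq_zip (l : List String) (hnd : l.Nodup) (d : PySem.Dict String String)
    (rem : List String) :
    (l.foldl
      (fun (st : PySem.Dict String String × List String) ch =>
        if st.1.contains ch then st
        else
          match st.2 with
          | [] => st
          | v :: rest => (st.1.insert ch v, rest))
      (d, rem)).1
    = ((l.filter (fun c => !(d.contains c))).zip rem).foldl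
        (fun d kv => d.insert kv.1 kv.2) d := by
  induction l generalizing d rem with
  | nil => rfl
  | cons ch l ih =>
    have hnd' : l.Nodup := (List.nodup_cons.mp hnd).2
    have hch : ch ∉ l := (List.nodup_cons.mp hnd).1
    simp only [List.foldl_cons, List.filter_cons]
    by_cases hc : d.contains ch = true
    · simp only [hc, Bool.not_true, Bool.false_eq_true, if_false, if_true]
      exact ih hnd' d rem
    · simp only [hc, Bool.not_false, if_true]
      cases rem with
      | nil =>
        simp only [List.zip_nil_right, List.foldl_nil, Bool.false_eq_true, if_false]
        rw [ih hnd' d []]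
        simp
      | cons v rest =>
        simp only [List.zip_cons_cons, List.foldl_cons, Bool.false_eq_true, if_false]
        rw [ih hnd' (d.insert ch v) rest]
        have hfe : List.filter (fun c => !(d.insert ch v).contains c) l
            = List.filter (fun c => !d.contains c) l := by
          apply List.filter_congr
          intro x hx
          rw [PySem.Dict.contains_insert]
          have : (x == ch) = false := beq_eq_false_iff_ne.mpr (fun h => hch (h ▸ hx))
          simp [this]
        rw [hfe]

-- ===== VERDICT (by name: the statement is the Claim_ definition above) =====
theorem complete_dictionary_spec : Claim_equal_complete_dictionary := by
  intro dictionary _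
  unfold Spec_complete_dictionary complete_dictionary complete_dictionary_alt
  simp only []
  rw [loop_eq _ _ _ _ rfl, loop_eq_zip _ pvAlphabet_nodup]
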